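-- pv_equiv track=rewrite | github.com/Mikko-ww/agent-kit | packages/self-evolve/src/self_evolve/jsonc.py | _strip_json_comments
-- ===== SOURCE A (Python) =====
-- def _strip_json_comments(content: str) -> str:
--     result: list[str] = []
--     in_string = False
--     escaped = False
--     index = 0
--     length = len(content)
--
--     while index < length:
--         char = content[index]
--         next_char = content[index + 1] if index + 1 < length else ""
--
--         if in_string:
--             result.append(char)
--             if escaped:
--                 escaped = False
--             elif char == "\\":
--                 escaped = True
--             elif char == '"':
--                 in_string = False
--             index += 1
--             continue
--
--         if char == '"':
--             in_string = True
--             result.append(char)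
--             index += 1
--             continue
--
--         if char == "/" and next_char == "/":
--             index += 2
--             while index < length and content[index] not in "\r\n":
--                 index += 1
--             continue
--
--         if char == "/" and next_char == "*":
--             index += 2
--             while index + 1 < length and not (
--                 content[index] == "*" and content[index + 1] == "/"
--             ):
--                 index += 1
--             index += 2
--             continue
--
--         result.append(char)
--         index += 1
--
--     return "".join(result)
-- ===== SOURCE B (Python) =====
-- def _strip_json_comments(content: str) -> str:
--     # Token-level scanner: copies whole string literals and plain characters as
--     # slices, skips comments by jumping (str.find for block comments); no
--     # in_string/escaped state flags.
--     out = []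
--     i = 0
--     n = len(content)
--     while i < n:
--         c = content[i]
--         if c == '"':
--             j = i + 1
--             while j < n and content[j] != '"':
--                 j += 2 if content[j] == '\\' else 1
--             out.append(content[i:j + 1])
--             i = j + 1
--         elif content[i:i + 2] == '//':
--             i += 2
--             while i < n and content[i] not in '\r\n':
--                 i += 1
--         elif content[i:i + 2] == '/*':
--             e = content.find('*/', i + 2)
--             i = n if e == -1 else e + 2
--         else:
--             out.append(c)
--             i += 1
--     return ''.join(out)
-- ===== Notes on version B (the rewrite author's own statement) =====
-- stated objective: alternative
-- what changed: Replaced A's character-at-a-time state machine with in_string/escaped boolean flags by a token-level scanner that copies whole string literals and plain characters as slices and skips comments by index jumps, using str.find to locate the end of a block comment.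
import Mathlib
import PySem

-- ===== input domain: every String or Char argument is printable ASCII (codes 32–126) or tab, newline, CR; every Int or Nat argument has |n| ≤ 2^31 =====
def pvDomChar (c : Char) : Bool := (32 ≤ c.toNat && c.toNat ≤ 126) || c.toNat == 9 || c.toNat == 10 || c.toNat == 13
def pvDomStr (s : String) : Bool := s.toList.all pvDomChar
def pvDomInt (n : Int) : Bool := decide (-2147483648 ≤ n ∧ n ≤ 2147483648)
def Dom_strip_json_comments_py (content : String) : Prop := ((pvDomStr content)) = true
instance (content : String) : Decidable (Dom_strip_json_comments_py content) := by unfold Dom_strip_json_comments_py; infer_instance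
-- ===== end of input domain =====

-- B is a token-level scanner (whole string literals and plain chars copied as slices,
-- comments skipped by jumping, `str.find` for block comments) replacing A's
-- char-by-char state machine with in_string/escaped flags; objective: alternative/idiomatic.
-- (Loops are ported fuel-style — structural recursion on a fuel that bounds the
-- remaining iterations; fuel never runs out on the initial call.)

-- ===== PORT A =====
-- inner `while` of the `//` branch: while index < length and content[index] not in "\r\n": index += 1
def pvA_lineSkip (cs : List Char) : Nat → Nat → Nat
  | 0, i => i
  | fuel + 1, i =>
    if h : i < cs.length then
      if cs[i] = '\r' ∨ cs[i] = '\n' then i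
      else pvA_lineSkip cs fuel (i + 1)
    else i

-- inner `while` of the `/*` branch plus the final `index += 2`
def pvA_blockSkip (cs : List Char) : Nat → Nat → Nat
  | 0, i => i + 2
  | fuel + 1, i =>
    if h : i + 1 < cs.length then
      if cs[i]'(by omega) = '*' ∧ cs[i + 1] = '/' then i + 2
      else pvA_blockSkip cs fuel (i + 1)
    else i + 2

-- the main `while index < length` loop; next_char = "" at the end is `cs[i+1]? = none`
def pvA_loop (cs : List Char) : Nat → Nat → Bool → Bool → List Char → List Char
  | 0, _, _, _, acc => acc
  | fuel + 1, i, inStr, escaped, acc =>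
    if h : i < cs.length then
      let c := cs[i]
      if inStr then
        if escaped then pvA_loop cs fuel (i + 1) true false (acc ++ [c])
        else if c = '\\' then pvA_loop cs fuel (i + 1) true true (acc ++ [c])
        else if c = '"' then pvA_loop cs fuel (i + 1) false false (acc ++ [c])
        else pvA_loop cs fuel (i + 1) true false (acc ++ [c])
      else if c = '"' then pvA_loop cs fuel (i + 1) true escaped (acc ++ [c])
      else if c = '/' ∧ cs[i + 1]? = some '/' then
        pvA_loop cs fuel (pvA_lineSkip cs cs.length (i + 2)) inStr escaped acc
      else if c = '/' ∧ cs[i + 1]? = some '*' then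
        pvA_loop cs fuel (pvA_blockSkip cs cs.length (i + 2)) inStr escaped acc
      else pvA_loop cs fuel (i + 1) inStr escaped (acc ++ [c])
    else acc

def strip_json_comments_py (content : String) : String :=
  String.ofList (pvA_loop content.toList (content.toList.length + 1) 0 false false [])

-- ===== PORT B =====
-- `while j < n and content[j] != '"': j += 2 if content[j] == '\\' else 1`
def pvB_strEnd (cs : List Char) : Nat → Nat → Nat
  | 0, j => j
  | fuel + 1, j =>
    if h : j < cs.length then
      if cs[j] ≠ '"' then
        pvB_strEnd cs fuel (j + (if cs[j] = '\\' then 2 else 1))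
      else j
    else j

-- `while i < n and content[i] not in '\r\n': i += 1`
def pvB_lineSkip (cs : List Char) : Nat → Nat → Nat
  | 0, i => i
  | fuel + 1, i =>
    if h : i < cs.length then
      if cs[i] = '\r' ∨ cs[i] = '\n' then i
      else pvB_lineSkip cs fuel (i + 1)
    else i

def pvB_loop (cs : List Char) : Nat → Nat → List Char → List Char
  | 0, _, acc => acc
  | fuel + 1, i, acc =>
    if h : i < cs.length then
      let c := cs[i]
      if c = '"' then
        let j := pvB_strEnd cs cs.length (i + 1)
        pvB_loop cs fuel (j + 1)
          (acc ++ PySem.List.slice cs (some (i : Int)) (some ((j + 1 : Nat) : Int)))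
      else if PySem.List.slice cs (some (i : Int)) (some ((i + 2 : Nat) : Int)) = ['/', '/'] then
        pvB_loop cs fuel (pvB_lineSkip cs cs.length (i + 2)) acc
      else if PySem.List.slice cs (some (i : Int)) (some ((i + 2 : Nat) : Int)) = ['/', '*'] then
        let e := PySem.Chars.findFrom cs ['*', '/'] ((i + 2 : Nat) : Int) none
        pvB_loop cs fuel (if e = -1 then cs.length else e.toNat + 2) acc
      else pvB_loop cs fuel (i + 1) (acc ++ [c])
    else acc

def strip_json_comments_py_alt (content : String) : String :=
  String.ofList (pvB_loop content.toList (content.toList.length + 1) 0 [])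

-- ===== PRECONDITION & SPEC =====
def Spec_strip_json_comments_py (content : String) (out : String) : Prop := out = strip_json_comments_py_alt content
instance (content : String) (out : String) : Decidable (Spec_strip_json_comments_py content out) := by unfold Spec_strip_json_comments_py; infer_instance

-- ===== CLAIM (what is proved, stated in full; the proofs are below) =====
def Claim_equal_strip_json_comments_py : Prop := ∀ (content : String), Dom_strip_json_comments_py content → Spec_strip_json_comments_py content (strip_json_comments_py content)

-- ===== LEMMAS AND PROOFS =====

theorem pvA_lineSkip_ge (cs : List Char) (f i : Nat) : i ≤ pvA_lineSkip cs f i := by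
  induction f generalizing i with
  | zero => simp [pvA_lineSkip]
  | succ f ih => rw [pvA_lineSkip]; have := ih (i + 1); split_ifs <;> omega

theorem pvA_blockSkip_ge (cs : List Char) (f i : Nat) : i + 2 ≤ pvA_blockSkip cs f i := by
  induction f generalizing i with
  | zero => simp [pvA_blockSkip]
  | succ f ih => rw [pvA_blockSkip]; have := ih (i + 1); split_ifs <;> omega

theorem pvB_strEnd_ge (cs : List Char) (f j : Nat) : j ≤ pvB_strEnd cs f j := by
  induction f generalizing j with
  | zero => simp [pvB_strEnd]
  | succ f ih =>
      rw [pvB_strEnd]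
      have h1 := ih (j + 2); have h2 := ih (j + 1)
      split_ifs <;> omega

theorem pvB_lineSkip_ge (cs : List Char) (f i : Nat) : i ≤ pvB_lineSkip cs f i := by
  induction f generalizing i with
  | zero => simp [pvB_lineSkip]
  | succ f ih => rw [pvB_lineSkip]; have := ih (i + 1); split_ifs <;> omega

-- the loops return the accumulator once the index passes the end
theorem pvA_loop_stop (cs : List Char) {i : Nat} (h : ¬ i < cs.length) (f : Nat)
    (b e : Bool) (acc : List Char) : pvA_loop cs f i b e acc = acc := by
  cases f with
  | zero => rfl
  | succ f => rw [pvA_loop]; simp [h]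

theorem pvB_loop_stop (cs : List Char) {i : Nat} (h : ¬ i < cs.length) (f : Nat)
    (acc : List Char) : pvB_loop cs f i acc = acc := by
  cases f with
  | zero => rfl
  | succ f => rw [pvB_loop]; simp [h]

theorem pvB_strEnd_stop (cs : List Char) {j : Nat} (h : ¬ j < cs.length) (f : Nat) :
    pvB_strEnd cs f j = j := by
  cases f with
  | zero => rfl
  | succ f => rw [pvB_strEnd]; simp [h]

-- the two line-comment inner loops are the same scan
theorem pv_lineSkip_eq (cs : List Char) (f i : Nat) :
    pvA_lineSkip cs f i = pvB_lineSkip cs f i := by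
  induction f generalizing i with
  | zero => rfl
  | succ f ih => rw [pvA_lineSkip, pvB_lineSkip]; split_ifs <;> simp [ih]

-- one-character head of a drop
theorem pv_take_one_drop {cs : List Char} {i : Nat} (h : i < cs.length) :
    List.take 1 (List.drop i cs) = [cs[i]] := by
  rw [List.drop_eq_getElem_cons h]; rfl

-- `content[i:i+2] = [c₁,c₂]` in terms of single characters (i < length)
theorem pv_slice2_iff {cs : List Char} {i : Nat} (h : i < cs.length) (c₁ c₂ : Char) :
    PySem.List.slice cs (some (i : Int)) (some ((i + 2 : Nat) : Int)) = [c₁, c₂] ↔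
      cs[i] = c₁ ∧ cs[i + 1]? = some c₂ := by
  rw [show ((i + 2 : Nat) : Int) = ((i : Nat) : Int) + ((2 : Nat) : Int) by push_cast; ring,
    PySem.List.slice_natCast_add, List.drop_eq_getElem_cons h]
  cases hc : cs[i + 1]? with
  | none =>
      have : cs.length ≤ i + 1 := by
        simpa using (List.getElem?_eq_none_iff).1 hc
      rw [List.drop_eq_nil_of_le this]
      simp
  | some d =>
      have hd : i + 1 < cs.length := (List.getElem?_eq_some_iff.1 hc).1
      rw [List.drop_eq_getElem_cons hd]
      have : cs[i + 1] = d := by simpa [hd] using hc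
      simp [this]

-- a two-character prefix of a drop, characterwise
theorem pv_pref2 {cs : List Char} {k : Nat} (hk : k + 1 < cs.length) :
    ['*', '/'] <+: List.drop k cs ↔ cs[k]'(by omega) = '*' ∧ cs[k + 1] = '/' := by
  rw [List.drop_eq_getElem_cons (by omega : k < cs.length), List.drop_eq_getElem_cons hk]
  simp only [List.cons_prefix_cons, List.nil_prefix, and_true]
  exact ⟨fun ⟨a, b⟩ => ⟨a.symm, b.symm⟩, fun ⟨a, b⟩ => ⟨a.symm, b.symm⟩⟩

-- no occurrence anywhere to the right, from non-infixness of the tail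
theorem pv_noinfix {cs sub : List Char} {k : Nat} (h : ¬ sub <:+: List.drop k cs) :
    ∀ p, k ≤ p → ¬ sub <+: List.drop p cs := by
  intro p hkp hpre
  apply h
  rw [← PySem.Chars.isIn_iff_infix, ← PySem.Chars.exists_prefix_drop_iff_isIn]
  exact ⟨p - k, by rwa [List.drop_drop, Nat.add_sub_cancel' hkp]⟩

-- block-comment scan, not-found case: A's skip runs past the end
theorem pv_blockSkip_notfound (cs : List Char) (f k : Nat) (hf : cs.length - k ≤ f)
    (h : ∀ p, k ≤ p → ¬ (['*', '/'] <+: List.drop p cs)) :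
    cs.length + 1 ≤ pvA_blockSkip cs f k := by
  induction f generalizing k with
  | zero => simp [pvA_blockSkip]; omega
  | succ f ih =>
      rw [pvA_blockSkip]
      split_ifs with h1 hc
      · exact absurd ((pv_pref2 h1).2 hc) (h k le_rfl)
      · exact ih (k + 1) (by omega) (fun p hp => h p (by omega))
      · omega

-- block-comment scan, found case: A's skip lands right after the first "*/"
theorem pv_blockSkip_found (cs : List Char) (f k p : Nat) (hf : cs.length - k ≤ f)
    (hkp : k ≤ p) (hp : ['*', '/'] <+: List.drop p cs)
    (hmin : ∀ q, k ≤ q → q < p → ¬ (['*', '/'] <+: List.drop q cs)) :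
    pvA_blockSkip cs f k = p + 2 := by
  have hpn : p + 1 < cs.length := by
    have := hp.length_le; simp at this; omega
  induction f generalizing k with
  | zero => omega
  | succ f ih =>
      rw [pvA_blockSkip]
      split_ifs with h1 hc
      · have hkpre : ['*', '/'] <+: List.drop k cs := (pv_pref2 h1).2 hc
        rcases Nat.lt_or_ge k p with hlt | hge
        · exact absurd hkpre (hmin k le_rfl hlt)
        · omega
      · have hknp : k ≠ p := by
          intro he; subst he
          exact hc ((pv_pref2 h1).1 hp)
        exact ih (k + 1) (by omega) (by omega) (fun q hq hqp => hmin q (by omega) hqp)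
      · omega

-- A's main loop does not depend on the fuel, as long as the fuel is sufficient
theorem pvA_fuel_irrel (cs : List Char) :
    ∀ (k fa fb i : Nat) (b e : Bool) (acc : List Char), cs.length - i ≤ k →
      cs.length - i ≤ fa → cs.length - i ≤ fb →
      pvA_loop cs fa i b e acc = pvA_loop cs fb i b e acc := by
  intro k
  induction k with
  | zero =>
      intro fa fb i b e acc hk _ _
      rw [pvA_loop_stop cs (by omega), pvA_loop_stop cs (by omega)]
  | succ k ih =>
      intro fa fb i b e acc hk ha hb
      by_cases hi : i < cs.length
      · obtain ⟨fa, rfl⟩ : ∃ f', fa = f' + 1 := ⟨fa - 1, by omega⟩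
        obtain ⟨fb, rfl⟩ : ∃ f', fb = f' + 1 := ⟨fb - 1, by omega⟩
        rw [pvA_loop, pvA_loop]
        simp only [dif_pos hi]
        have hl := pvA_lineSkip_ge cs cs.length (i + 2)
        have hbk := pvA_blockSkip_ge cs cs.length (i + 2)
        split_ifs <;> apply ih <;> omega
      · rw [pvA_loop_stop cs hi, pvA_loop_stop cs hi]

-- A from string mode (escaped = False) runs to B's string-closing index and re-enters normal mode
theorem pv_string_mode (cs : List Char) :
    ∀ (k fa fs fc j : Nat) (acc : List Char), cs.length - j ≤ k → cs.length - j ≤ fa →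
      cs.length - j ≤ fs → cs.length - j ≤ fc →
      pvA_loop cs fa j true false acc =
        pvA_loop cs fc (pvB_strEnd cs fs j + 1) false false
          (acc ++ List.take (pvB_strEnd cs fs j + 1 - j) (List.drop j cs)) := by
  intro k
  induction k with
  | zero =>
      intro fa fs fc j acc hk _ _ _
      have hj : ¬ j < cs.length := by omega
      rw [pvA_loop_stop cs hj, pvB_strEnd_stop cs hj,
        List.drop_eq_nil_of_le (by omega), pvA_loop_stop cs (by omega)]
      simp
  | succ k ih =>
      intro fa fs fc j acc hk ha hs hc
      by_cases hj : j < cs.length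
      · obtain ⟨fa, rfl⟩ : ∃ f', fa = f' + 1 := ⟨fa - 1, by omega⟩
        obtain ⟨fs, rfl⟩ : ∃ f', fs = f' + 1 := ⟨fs - 1, by omega⟩
        by_cases hq : cs[j] = '"'
        · -- the closing quote: leave string mode
          have hnb : cs[j] ≠ '\\' := by rw [hq]; decide
          have hE : pvB_strEnd cs (fs + 1) j = j := by rw [pvB_strEnd]; simp [hj, hq]
          rw [pvA_loop, hE]
          have h1 : j + 1 - j = 1 := by omega
          rw [h1, pv_take_one_drop hj]
          simp only [dif_pos hj, if_true, if_neg hnb, if_pos hq, Bool.false_eq_true, if_false]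
          exact pvA_fuel_irrel cs (cs.length - (j + 1)) fa fc (j + 1) false false _
            le_rfl (by omega) (by omega)
        · by_cases hb : cs[j] = '\\'
          · -- a backslash: the escape consumes the next character too
            have hE : pvB_strEnd cs (fs + 1) j = pvB_strEnd cs fs (j + 2) := by
              rw [pvB_strEnd]; simp [hj, hb]
            rw [pvA_loop]
            simp only [dif_pos hj, if_true, if_neg hq, if_pos hb, Bool.false_eq_true, if_false]
            by_cases hj1 : j + 1 < cs.length
            · obtain ⟨fa, rfl⟩ : ∃ f', fa = f' + 1 := ⟨fa - 1, by omega⟩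
              rw [pvA_loop]
              simp only [dif_pos hj1, if_true]
              rw [ih fa fs fc (j + 2) _ (by omega) (by omega) (by omega) (by omega), hE]
              have hge := pvB_strEnd_ge cs fs (j + 2)
              rw [List.drop_eq_getElem_cons hj, List.drop_eq_getElem_cons hj1]
              have h2 : pvB_strEnd cs fs (j + 2) + 1 - j =
                  (pvB_strEnd cs fs (j + 2) + 1 - (j + 2)) + 1 + 1 := by omega
              rw [h2, List.take_succ_cons, List.take_succ_cons]
              simp
            · -- trailing backslash at the very end
              rw [pvA_loop_stop cs hj1, hE, pvB_strEnd_stop cs (by omega),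
                pvA_loop_stop cs (by omega), List.drop_eq_getElem_cons hj,
                List.drop_eq_nil_of_le (by omega : cs.length ≤ j + 1)]
              have h3 : j + 2 + 1 - j = 3 := by omega
              rw [h3]
              simp
          · -- an ordinary string character
            have hE : pvB_strEnd cs (fs + 1) j = pvB_strEnd cs fs (j + 1) := by
              rw [pvB_strEnd]; simp [hj, hq, hb]
            rw [pvA_loop]
            simp only [dif_pos hj, if_true, if_neg hq, if_neg hb, Bool.false_eq_true, if_false]
            rw [ih fa fs fc (j + 1) _ (by omega) (by omega) (by omega) (by omega), hE]
            have hge := pvB_strEnd_ge cs fs (j + 1)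
            rw [List.drop_eq_getElem_cons hj]
            have h2 : pvB_strEnd cs fs (j + 1) + 1 - j =
                (pvB_strEnd cs fs (j + 1) + 1 - (j + 1)) + 1 := by omega
            rw [h2, List.take_succ_cons]
            simp
      · rw [pvA_loop_stop cs hj, pvB_strEnd_stop cs hj,
          List.drop_eq_nil_of_le (by omega), pvA_loop_stop cs (by omega)]
        simp

theorem pv_main (cs : List Char) :
    ∀ (k fa fb i : Nat) (acc : List Char), cs.length - i ≤ k → cs.length - i ≤ fa →
      cs.length - i ≤ fb → pvA_loop cs fa i false false acc = pvB_loop cs fb i acc := by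
  intro k
  induction k with
  | zero =>
      intro fa fb i acc hk _ _
      rw [pvA_loop_stop cs (by omega), pvB_loop_stop cs (by omega)]
  | succ k ih =>
      intro fa fb i acc hk ha hb
      by_cases hi : i < cs.length
      · obtain ⟨fa, rfl⟩ : ∃ f', fa = f' + 1 := ⟨fa - 1, by omega⟩
        obtain ⟨fb, rfl⟩ : ∃ f', fb = f' + 1 := ⟨fb - 1, by omega⟩
        by_cases hq : cs[i] = '"'
        · -- a string literal: A walks it in string mode, B slices it out whole
          rw [pvA_loop, pvB_loop]
          simp only [dif_pos hi, if_pos hq, Bool.false_eq_true, if_false]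
          have hgE := pvB_strEnd_ge cs cs.length (i + 1)
          rw [pv_string_mode cs k fa cs.length fa (i + 1) _ (by omega) (by omega)
              (by omega) (by omega),
            ih fa fb (pvB_strEnd cs cs.length (i + 1) + 1) _ (by omega) (by omega) (by omega)]
          rw [PySem.List.slice_natCast, List.drop_eq_getElem_cons hi]
          have h2 : pvB_strEnd cs cs.length (i + 1) + 1 - i =
              (pvB_strEnd cs cs.length (i + 1) + 1 - (i + 1)) + 1 := by omega
          rw [h2, List.take_succ_cons]
          simp [hq]
        · by_cases hsl : cs[i] = '/' ∧ cs[i + 1]? = some '/'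
          · -- line comment: identical skip loops
            rw [pvA_loop, pvB_loop]
            simp only [dif_pos hi, if_neg hq, if_pos hsl, Bool.false_eq_true, if_false,
              if_pos ((pv_slice2_iff hi '/' '/').2 hsl)]
            rw [pv_lineSkip_eq]
            have := pvB_lineSkip_ge cs cs.length (i + 2)
            exact ih fa fb (pvB_lineSkip cs cs.length (i + 2)) acc
              (by omega) (by omega) (by omega)
          · by_cases hbl : cs[i] = '/' ∧ cs[i + 1]? = some '*'
            · -- block comment: A's scan vs B's str.find
              have hi2 : i + 2 ≤ cs.length := by
                have := (List.getElem?_eq_some_iff.1 hbl.2).1; omega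
              rw [pvA_loop, pvB_loop]
              simp only [dif_pos hi, if_neg hq, if_neg hsl, if_pos hbl,
                Bool.false_eq_true, if_false,
                if_neg (fun hc => hsl ((pv_slice2_iff hi '/' '/').1 hc)),
                if_pos ((pv_slice2_iff hi '/' '*').2 hbl)]
              by_cases he : PySem.Chars.findFrom cs ['*', '/'] ((i + 2 : Nat) : Int) none = -1
              · -- unterminated block comment: both run to the end
                have hno := pv_noinfix
                  ((PySem.Chars.findFrom_natCast_eq_neg_one_iff cs ['*', '/'] (i + 2) hi2).1 he)
                have hskip := pv_blockSkip_notfound cs cs.length (i + 2) (by omega) hno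
                rw [pvA_loop_stop cs (by omega), if_pos he, pvB_loop_stop cs (by omega)]
              · obtain ⟨hgee, hpre, hmin⟩ :=
                  PySem.Chars.findFrom_natCast_spec cs ['*', '/'] (i + 2) hi2 he
                have hskip := pv_blockSkip_found cs cs.length (i + 2)
                  (PySem.Chars.findFrom cs ['*', '/'] ((i + 2 : Nat) : Int) none).toNat
                  (by omega) (by omega) hpre (fun q hq1 hq2 => hmin q hq1 hq2)
                rw [hskip, if_neg he]
                exact ih fa fb
                  ((PySem.Chars.findFrom cs ['*', '/'] ((i + 2 : Nat) : Int) none).toNat + 2)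
                  acc (by omega) (by omega) (by omega)
            · -- ordinary character
              rw [pvA_loop, pvB_loop]
              simp only [dif_pos hi, if_neg hq, if_neg hsl, if_neg hbl,
                Bool.false_eq_true, if_false,
                if_neg (fun hc => hsl ((pv_slice2_iff hi '/' '/').1 hc)),
                if_neg (fun hc => hbl ((pv_slice2_iff hi '/' '*').1 hc))]
              exact ih fa fb (i + 1) _ (by omega) (by omega) (by omega)
      · rw [pvA_loop_stop cs hi, pvB_loop_stop cs hi]

-- ===== VERDICT (by name: the statement is the Claim_ definition above) =====
theorem strip_json_comments_py_spec : Claim_equal_strip_json_comments_py := by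
  intro content _
  unfold Spec_strip_json_comments_py strip_json_comments_py strip_json_comments_py_alt
  rw [pv_main content.toList (content.toList.length + 1) (content.toList.length + 1)
    (content.toList.length + 1) 0 [] (by omega) (by omega) (by omega)]
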